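-- pv_equiv track=rewrite | github.com/ashwinidoke7/VRPD | helper.py | get_subtours_in_region
-- ===== SOURCE A (Python) =====
-- def get_subtours_in_region(tour, selected_cities):
--
--     subtours = []
--     current_subtour = []
--     for idx in range(len(tour)-1):
--         city = tour[idx]
--
--         if city in selected_cities:
--             current_subtour.append(city)
--
--             if tour[idx+1] not in selected_cities:
--                 subtours.append(current_subtour)
--                 current_subtour = []
--
--         elif current_subtour:
--             subtours.append(current_subtour)
--             current_subtour = []
--
--     if current_subtour:
--         subtours.append(current_subtour)
--
--     return subtours
-- ===== SOURCE B (Python) =====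
-- def get_subtours_in_region(tour, selected_cities):
--     # staged passes: mark membership, locate run starts and run ends by index, slice
--     body = tour[:-1]
--     mask = [c in selected_cities for c in body]
--     n = len(body)
--     starts = [i for i in range(n) if mask[i] and (i == 0 or not mask[i - 1])]
--     ends = [i for i in range(n) if mask[i] and (i == n - 1 or not mask[i + 1])]
--     return [body[s:e + 1] for s, e in zip(starts, ends)]
-- ===== Notes on version B (the rewrite author's own statement) =====
-- stated objective: alternative
-- what changed: Replaced A's single-pass lookahead state machine (pending current_subtour, tour[idx+1] peek, trailing flush) with staged passes: build a membership mask over tour[:-1], collect run-start indices and run-end indices by boundary tests on the mask, then slice the body at each (start, end) pair.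
import Mathlib
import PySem

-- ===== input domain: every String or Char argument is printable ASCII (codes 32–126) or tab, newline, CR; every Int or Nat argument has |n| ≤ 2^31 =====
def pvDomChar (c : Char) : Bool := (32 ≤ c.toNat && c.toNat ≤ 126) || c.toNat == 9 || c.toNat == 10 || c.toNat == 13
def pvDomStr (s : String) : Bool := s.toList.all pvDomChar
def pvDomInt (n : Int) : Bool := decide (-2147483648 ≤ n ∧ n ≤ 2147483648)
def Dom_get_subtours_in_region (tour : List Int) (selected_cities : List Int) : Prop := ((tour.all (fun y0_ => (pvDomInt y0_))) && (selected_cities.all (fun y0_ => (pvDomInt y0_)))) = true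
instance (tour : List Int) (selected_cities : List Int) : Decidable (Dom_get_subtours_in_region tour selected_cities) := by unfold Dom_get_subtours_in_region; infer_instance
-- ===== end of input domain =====

-- B replaces A's lookahead state machine with staged passes: a membership mask over
-- tour[:-1], run-start and run-end index lists, then slicing (objective: alternative).

-- ===== PORT A =====
-- loop body of A's `for idx in range(len(tour)-1)`; state = (subtours, current_subtour)
def pvStepA (tour : List Int) (selected_cities : List Int)
    (st : List (List Int) × List Int) (idx : Int) : List (List Int) × List Int :=
  let city := PySem.List.pyGetD tour idx 0   -- tour[idx]; idx is always in range in this loop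
  if city ∈ selected_cities then
    let cur := st.2 ++ [city]
    if PySem.List.pyGetD tour (idx + 1) 0 ∉ selected_cities then (st.1 ++ [cur], [])
    else (st.1, cur)
  else if st.2 ≠ [] then (st.1 ++ [st.2], [])
  else st

def get_subtours_in_region (tour : List Int) (selected_cities : List Int) : List (List Int) :=
  let st := (PySem.List.pyRange 0 ((tour.length : Int) - 1) 1).foldl
      (pvStepA tour selected_cities) ([], [])
  if st.2 ≠ [] then st.1 ++ [st.2] else st.1

-- ===== PORT B =====
-- Source B: body = tour[:-1]; mask = membership list; starts/ends = boundary indices; slices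
def get_subtours_in_region_alt (tour : List Int) (selected_cities : List Int) : List (List Int) :=
  let body := PySem.List.slice tour none (some (-1))
  let mask := body.map (fun c => decide (c ∈ selected_cities))
  let n := body.length
  let starts := (List.range n).filter
      (fun i => mask.getD i false && (i == 0 || !(mask.getD (i - 1) false)))
  let ends := (List.range n).filter
      (fun i => mask.getD i false && (i == n - 1 || !(mask.getD (i + 1) false)))
  (starts.zip ends).map
    (fun p => PySem.List.slice body (some (p.1 : Int)) (some ((p.2 : Int) + 1)))

-- ===== PRECONDITION & SPEC =====
def Spec_get_subtours_in_region (tour : List Int) (selected_cities : List Int) (out : List (List Int)) : Prop := out = get_subtours_in_region_alt tour selected_cities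
instance (tour : List Int) (selected_cities : List Int) (out : List (List Int)) : Decidable (Spec_get_subtours_in_region tour selected_cities out) := by unfold Spec_get_subtours_in_region; infer_instance

-- ===== CLAIM (what is proved, stated in full; the proofs are below) =====
def Claim_equal_get_subtours_in_region : Prop := ∀ (tour : List Int) (selected_cities : List Int), Dom_get_subtours_in_region tour selected_cities → Spec_get_subtours_in_region tour selected_cities (get_subtours_in_region tour selected_cities)

-- ===== LEMMAS AND PROOFS =====

-- A's step, rewritten on the pair (city, next city) instead of an index
def pvStepP (sel : List Int) (st : List (List Int) × List Int)
    (p : Int × Int) : List (List Int) × List Int :=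
  if p.1 ∈ sel then
    let cur := st.2 ++ [p.1]
    if p.2 ∉ sel then (st.1 ++ [cur], []) else (st.1, cur)
  else if st.2 ≠ [] then (st.1 ++ [st.2], [])
  else st

-- each element of body paired with its successor (z past the end)
def pvZipNext (z : Int) : List Int → List (Int × Int)
  | [] => []
  | c :: rest => (c, rest.headD z) :: pvZipNext z rest

-- maximal runs of consecutive elements sharing the membership key, tagged with the key
def pvRuns (selected_cities : List Int) : List Int → List (Bool × List Int)
  | [] => []
  | x :: xs =>
    let k := decide (x ∈ selected_cities)
    match pvRuns selected_cities xs with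
    | [] => [(k, [x])]
    | (k', g) :: rest =>
      if k = k' then (k, x :: g) :: rest else (k, [x]) :: (k', g) :: rest

-- the selected runs of body: common reference value for both ports
def pvOut (sel body : List Int) : List (List Int) :=
  ((pvRuns sel body).filter (fun kg => kg.1)).map Prod.snd

-- prepend a pending selected run
def pvMerge (cur : List Int) (gs : List (List Int)) : List (List Int) :=
  if cur = [] then gs
  else match gs with
    | [] => [cur]
    | g :: r => (cur ++ g) :: r

-- A's trailing `if current_subtour: subtours.append(current_subtour)`
def pvFlush (st : List (List Int) × List Int) : List (List Int) :=
  if st.2 ≠ [] then st.1 ++ [st.2] else st.1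

-- B-side notions: the mask, start/end index lists over a mask, slice list
def pvMask (sel body : List Int) : List Bool := body.map (fun c => decide (c ∈ sel))

def pvStarts (m : List Bool) : List Nat :=
  (List.range m.length).filter
    (fun i => m.getD i false && (i == 0 || !(m.getD (i - 1) false)))

def pvEnds (m : List Bool) : List Nat :=
  (List.range m.length).filter
    (fun i => m.getD i false && (i == m.length - 1 || !(m.getD (i + 1) false)))

def pvSlices (body : List Int) (S E : List Nat) : List (List Int) :=
  (S.zip E).map (fun p => (body.drop p.1).take (p.2 + 1 - p.1))

theorem pvRuns_cons_head (sel : List Int) (x : Int) (xs : List Int) :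
    ∃ g rs, pvRuns sel (x :: xs) = (decide (x ∈ sel), g) :: rs := by
  simp only [pvRuns]
  rcases h : pvRuns sel xs with _ | ⟨⟨k', g⟩, rest⟩
  · exact ⟨[x], [], rfl⟩
  · by_cases hk : decide (x ∈ sel) = k'
    · exact ⟨x :: g, rest, by simp [hk]⟩
    · exact ⟨[x], (k', g) :: rest, by simp [hk]⟩

theorem pvRuns_cons_of_run (sel : List Int) (c r : Int) (t : List Int)
    (k : Bool) (g : List Int) (rs : List (Bool × List Int))
    (hruns : pvRuns sel (r :: t) = (k, g) :: rs) :
    pvRuns sel (c :: r :: t) =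
      if decide (c ∈ sel) = k then (decide (c ∈ sel), c :: g) :: rs
      else (decide (c ∈ sel), [c]) :: (k, g) :: rs := by
  conv_lhs => rw [pvRuns]
  rw [hruns]

theorem pvOut_cons_not_mem (sel : List Int) (c : Int) (rest : List Int) (hc : c ∉ sel) :
    pvOut sel (c :: rest) = pvOut sel rest := by
  rcases rest with _ | ⟨r, t⟩
  · simp [pvOut, pvRuns, hc]
  · obtain ⟨g, rs, hruns⟩ := pvRuns_cons_head sel r t
    rw [pvOut, pvRuns_cons_of_run sel c r t _ g rs hruns]
    by_cases hr : r ∈ sel <;> simp [hc, hr, pvOut, hruns]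

-- invariant: a pending current_subtour forces the next city to be selected
theorem pvMain (sel : List Int) (z : Int) : ∀ (body : List Int)
    (acc : List (List Int)) (cur : List Int),
    (∀ c t, body = c :: t → cur ≠ [] → c ∈ sel) →
    pvFlush (List.foldl (pvStepP sel) (acc, cur) (pvZipNext z body))
      = acc ++ pvMerge cur (pvOut sel body) := by
  intro body
  induction body with
  | nil =>
    intro acc cur _
    by_cases h : cur = [] <;> simp [pvZipNext, pvFlush, pvOut, pvRuns, pvMerge, h]
  | cons c rest ih =>
    intro acc cur hinv
    by_cases hc : c ∈ sel
    · cases rest with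
      | nil =>
        by_cases hz : z ∈ sel <;>
          by_cases h : cur = [] <;>
          simp [pvZipNext, pvStepP, pvFlush, pvOut, pvRuns, pvMerge, hc, hz, h]
      | cons r t =>
        obtain ⟨g, rs, hruns⟩ := pvRuns_cons_head sel r t
        have hzip : pvZipNext z (c :: r :: t) = (c, r) :: pvZipNext z (r :: t) := rfl
        by_cases hr : r ∈ sel
        · have hr' : decide (r ∈ sel) = true := by simp [hr]
          rw [hr'] at hruns
          rw [hzip, List.foldl_cons,
            show pvStepP sel (acc, cur) (c, r) = (acc, cur ++ [c]) by simp [pvStepP, hc, hr],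
            ih acc (cur ++ [c]) (by rintro c' t' h' _; cases h'; exact hr)]
          have hout2 : pvOut sel (c :: r :: t)
              = (c :: g) :: (rs.filter (fun kg => kg.1)).map Prod.snd := by
            rw [pvOut, pvRuns_cons_of_run sel c r t _ g rs hruns]; simp [hc]
          rw [pvOut, hruns]
          simp only [List.filter_cons]
          rw [hout2]
          by_cases h : cur = [] <;> simp [pvMerge, h]
        · have hr' : decide (r ∈ sel) = false := by simp [hr]
          rw [hr'] at hruns
          rw [hzip, List.foldl_cons,
            show pvStepP sel (acc, cur) (c, r) = (acc ++ [cur ++ [c]], []) by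
              simp [pvStepP, hc, hr],
            ih (acc ++ [cur ++ [c]]) [] (by intro _ _ _ h; exact absurd rfl h)]
          have hout2 : pvOut sel (c :: r :: t)
              = [c] :: (rs.filter (fun kg => kg.1)).map Prod.snd := by
            rw [pvOut, pvRuns_cons_of_run sel c r t _ g rs hruns]; simp [hc]
          rw [pvOut, hruns]
          simp only [List.filter_cons]
          rw [hout2]
          by_cases h : cur = [] <;> simp [pvMerge, h]
    · have hcur : cur = [] := by
        by_contra h; exact hc (hinv c rest rfl h)
      subst hcur
      have hzip : pvZipNext z (c :: rest) = (c, rest.headD z) :: pvZipNext z rest := rfl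
      rw [hzip, List.foldl_cons,
        show pvStepP sel (acc, ([] : List Int)) (c, rest.headD z) = (acc, []) by
          simp [pvStepP, hc],
        ih acc [] (by intro _ _ _ h; exact absurd rfl h),
        pvOut_cons_not_mem sel c rest hc]

-- the successor of body[j] in A's lookahead, read off dropLast/getLastD
theorem pvHeadD_drop (tour : List Int) (j : Nat) (hj : j < tour.length) :
    (tour.dropLast.drop j).headD (tour.getLastD 0) = tour[j] := by
  rcases lt_or_ge j (tour.length - 1) with h | h
  · rw [List.drop_eq_getElem_cons (by simpa using h)]
    simp [List.getElem_dropLast]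
  · have hj' : j = tour.length - 1 := by omega
    have hnil : tour.dropLast.drop j = [] := List.drop_eq_nil_of_le (by simp; omega)
    rw [hnil, List.getLastD_eq_getLast?]
    simp only [List.headD]
    rw [List.getLast?_eq_getElem?]
    simp [hj', List.getElem?_eq_getElem (by omega : tour.length - 1 < tour.length)]

-- A's index loop is the pair loop over (city, successor) pairs of tour[:-1]
theorem pvBridge (tour sel : List Int) : ∀ (k : Nat) (i : Nat)
    (st : List (List Int) × List Int), i + k = tour.length - 1 →
    (PySem.List.pyRange (i : Int) ((tour.length : Int) - 1) 1).foldl (pvStepA tour sel) st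
      = List.foldl (pvStepP sel) st (pvZipNext (tour.getLastD 0) (tour.dropLast.drop i)) := by
  intro k
  induction k with
  | zero =>
    intro i st hi
    rw [PySem.List.pyRange_one_eq_nil (by omega : ((tour.length : Int) - 1) ≤ (i : Int)),
      List.drop_eq_nil_of_le (by simp; omega)]
    rfl
  | succ k ihk =>
    intro i st hi
    have hiN : i < tour.dropLast.length := by simp; omega
    rw [PySem.List.pyRange_one_cons (by omega : (i : Int) < (tour.length : Int) - 1),
      List.foldl_cons, List.drop_eq_getElem_cons hiN]
    have hzip : pvZipNext (tour.getLastD 0) (tour.dropLast[i] :: tour.dropLast.drop (i + 1))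
        = (tour.dropLast[i], (tour.dropLast.drop (i + 1)).headD (tour.getLastD 0))
            :: pvZipNext (tour.getLastD 0) (tour.dropLast.drop (i + 1)) := rfl
    rw [hzip, List.foldl_cons]
    have hstep : pvStepA tour sel st (i : Int)
        = pvStepP sel st
            (tour.dropLast[i], (tour.dropLast.drop (i + 1)).headD (tour.getLastD 0)) := by
      have h1 : PySem.List.pyGetD tour (i : Int) 0 = tour[i]'(by omega) := by
        rw [PySem.List.pyGetD_eq_getElem tour 0 (by omega)
          (by exact_mod_cast (by omega : (i : Int) < tour.length))]
        simp
      have h2 : PySem.List.pyGetD tour ((i : Int) + 1) 0 = tour[i + 1]'(by omega) := by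
        rw [show ((i : Int) + 1) = ((i + 1 : Nat) : Int) by push_cast; ring,
          PySem.List.pyGetD_eq_getElem tour 0 (by omega)
            (by exact_mod_cast (by omega : ((i + 1 : Nat) : Int) < tour.length))]
        simp
      rw [pvStepA, pvStepP, h1, h2, List.getElem_dropLast,
        pvHeadD_drop tour (i + 1) (by omega)]
    rw [hstep]
    have := ihk (i + 1) (pvStepP sel st
      (tour.dropLast[i], (tour.dropLast.drop (i + 1)).headD (tour.getLastD 0))) (by omega)
    rw [show ((i : Int) + 1) = ((i + 1 : Nat) : Int) by push_cast; ring]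
    exact this

-- ---- B-side lemmas ----

-- peeling one index off a filtered range
theorem pvFilterRangeSucc (p : Nat → Bool) (n : Nat) :
    (List.range (n + 1)).filter p
      = (if p 0 then [0] else []) ++ (((List.range n).filter (fun i => p (i + 1))).map (· + 1)) := by
  rw [List.range_succ_eq_map, List.filter_cons]
  by_cases h0 : p 0 <;>
    simp [h0, List.filter_map, Function.comp_def, Nat.succ_eq_add_one]

theorem pvStarts_false_cons (m : List Bool) :
    pvStarts (false :: m) = (pvStarts m).map (· + 1) := by
  unfold pvStarts
  rw [show (false :: m).length = m.length + 1 by simp, pvFilterRangeSucc]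
  simp only [List.getD_cons_zero, Bool.false_and, Bool.false_eq_true, if_false,
    List.nil_append]
  congr 1
  apply List.filter_congr
  intro i _
  cases i with
  | zero => simp
  | succ j => simp

theorem pvStarts_true_cons (m : List Bool) :
    pvStarts (true :: m)
      = 0 :: ((if m.getD 0 false then (pvStarts m).tail else pvStarts m).map (· + 1)) := by
  have hq : ∀ i, ((true :: m).getD (i + 1) false
      && ((i + 1 : Nat) == 0 || !((true :: m).getD (i + 1 - 1) false)))
      = (m.getD i false && !((true :: m).getD i false)) := by
    intro i; cases i <;> simp
  unfold pvStarts
  rw [show (true :: m).length = m.length + 1 by simp, pvFilterRangeSucc,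
    List.filter_congr (fun i _ => hq i)]
  simp only [List.getD_cons_zero, Nat.zero_sub, beq_self_eq_true, Bool.true_or,
    Bool.true_and, if_true, List.cons_append, List.nil_append, List.cons.injEq, true_and]
  rcases m with _ | ⟨b, m'⟩
  · simp
  · cases b
    · -- head of m is false: keep all of pvStarts m, everything shifts
      rw [if_neg (by simp)]
      rw [show (false :: m').length = m'.length + 1 by simp, pvFilterRangeSucc,
        pvFilterRangeSucc]
      simp only [List.getD_cons_zero, Bool.false_and, Bool.false_eq_true, if_false,
        List.nil_append, List.map_map]
      congr 1
    · -- head of m is true: index 0 of m is a start; it is dropped by the shift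
      rw [if_pos (by simp)]
      rw [show (true :: m').length = m'.length + 1 by simp, pvFilterRangeSucc,
        pvFilterRangeSucc]
      simp only [List.getD_cons_zero, Bool.true_and, beq_self_eq_true, Bool.true_or,
        if_true, Bool.not_true, Bool.and_false, Bool.false_eq_true, if_false,
        List.nil_append, List.cons_append, List.tail_cons, List.map_map]
      congr 1

theorem pvEnds_cons (b : Bool) (m : List Bool) :
    pvEnds (b :: m)
      = (if b && !(m.getD 0 false) then [0] else []) ++ (pvEnds m).map (· + 1) := by
  unfold pvEnds
  rw [show (b :: m).length = m.length + 1 by simp, pvFilterRangeSucc]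
  congr 1
  · -- index 0: b && (0 == (m.length+1) - 1 || !(m.getD 0))  =  b && !(m.getD 0)
    rcases m with _ | ⟨c, m'⟩ <;> cases b <;> simp
  · congr 1
    apply List.filter_congr
    intro i hi
    have hi' : i < m.length := List.mem_range.mp hi
    have h2 : ((i + 1 : Nat) == m.length + 1 - 1) = ((i : Nat) == m.length - 1) := by
      rw [Bool.eq_iff_iff]
      simp only [beq_iff_eq]
      omega
    rw [h2]
    cases i <;> simp

theorem pvSlices_shift (x : Int) (body : List Int) (S E : List Nat) :
    pvSlices (x :: body) (S.map (· + 1)) (E.map (· + 1)) = pvSlices body S E := by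
  unfold pvSlices
  induction S generalizing E with
  | nil => simp
  | cons s S ih =>
    cases E with
    | nil => simp
    | cons e E =>
      simp only [List.map_cons, List.zip_cons_cons, List.map_cons] at ih ⊢
      rw [ih]
      congr 1
      rw [List.drop_succ_cons]
      congr 1
      omega

def pvSlicesConsEq (body : List Int) (s e : Nat) (S E : List Nat) :
    pvSlices body (s :: S) (e :: E)
      = ((body.drop s).take (e + 1 - s)) :: pvSlices body S E := rfl

-- main B-side theorem: the staged-pass slices are exactly the selected runs
theorem pvBMain (sel : List Int) : ∀ body : List Int,
    pvSlices body (pvStarts (pvMask sel body)) (pvEnds (pvMask sel body)) = pvOut sel body := by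
  intro body
  induction body with
  | nil => rfl
  | cons c rest ih =>
    by_cases hc : c ∈ sel
    · have hmask : pvMask sel (c :: rest) = true :: pvMask sel rest := by simp [pvMask, hc]
      cases rest with
      | nil =>
        rw [hmask]
        simp [pvMask, pvStarts, pvEnds, pvSlices, pvOut, pvRuns, hc, List.range_succ]
      | cons r t =>
        obtain ⟨g, rs, hruns⟩ := pvRuns_cons_head sel r t
        by_cases hr : r ∈ sel
        · -- c and r both selected: the first run continues past c
          have hr' : decide (r ∈ sel) = true := by simp [hr]
          rw [hr'] at hruns
          have hm0 : (pvMask sel (r :: t)).getD 0 false = true := by simp [pvMask, hr]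
          have hout : pvOut sel (r :: t)
              = g :: (rs.filter (fun kg => kg.1)).map Prod.snd := by
            rw [pvOut, hruns]; simp
          have hout2 : pvOut sel (c :: r :: t)
              = (c :: g) :: (rs.filter (fun kg => kg.1)).map Prod.snd := by
            rw [pvOut, pvRuns_cons_of_run sel c r t true g rs hruns]; simp [hc]
          -- pvStarts of the sublist starts with 0
          have hS : ∃ S', pvStarts (pvMask sel (r :: t)) = 0 :: S' := by
            rw [show pvMask sel (r :: t) = true :: pvMask sel t by simp [pvMask, hr],
              pvStarts_true_cons]
            exact ⟨_, rfl⟩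
          obtain ⟨S', hS⟩ := hS
          -- pvEnds of the sublist is nonempty (otherwise the IH contradicts hout)
          rcases hE : pvEnds (pvMask sel (r :: t)) with _ | ⟨e0, E'⟩
          · rw [hS, hE, hout] at ih
            simp [pvSlices] at ih
          · rw [hS, hE, pvSlicesConsEq, hout, List.cons_eq_cons] at ih
            obtain ⟨ihg, ihrest⟩ := ih
            rw [hmask, pvStarts_true_cons, if_pos hm0, hS, List.tail_cons,
              pvEnds_cons, hm0]
            simp only [Bool.not_true, Bool.and_false, Bool.false_eq_true, if_false,
              List.nil_append, hE, List.map_cons]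
            rw [pvSlicesConsEq, pvSlices_shift, ihrest, hout2]
            congr 1
            simp only [List.drop_zero, Nat.sub_zero] at ihg ⊢
            rw [List.take_succ_cons, ihg]
        · -- c selected, r not: the run ending at c is emitted, then recurse
          have hr' : decide (r ∈ sel) = false := by simp [hr]
          rw [hr'] at hruns
          have hm0 : (pvMask sel (r :: t)).getD 0 false = false := by simp [pvMask, hr]
          have hout2 : pvOut sel (c :: r :: t)
              = [c] :: (rs.filter (fun kg => kg.1)).map Prod.snd := by
            rw [pvOut, pvRuns_cons_of_run sel c r t false g rs hruns]; simp [hc]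
          have hout3 : pvOut sel (r :: t)
              = (rs.filter (fun kg => kg.1)).map Prod.snd := by
            rw [pvOut, hruns]; simp
          rw [hmask, pvStarts_true_cons, if_neg (by rw [hm0]; exact Bool.false_ne_true),
            pvEnds_cons, hm0]
          simp only [Bool.not_false, Bool.and_true, if_true,
            List.cons_append, List.nil_append]
          rw [pvSlicesConsEq, pvSlices_shift, ih, hout2, hout3]
          simp
    · have hmask : pvMask sel (c :: rest) = false :: pvMask sel rest := by simp [pvMask, hc]
      rw [hmask, pvStarts_false_cons, pvEnds_cons]
      simp only [Bool.false_and, Bool.false_eq_true, if_false, List.nil_append]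
      rw [pvSlices_shift, ih, pvOut_cons_not_mem sel c rest hc]

-- the port of B computes pvSlices of the staged index lists
theorem pvAltEq (tour sel : List Int) :
    get_subtours_in_region_alt tour sel
      = pvSlices tour.dropLast (pvStarts (pvMask sel tour.dropLast))
          (pvEnds (pvMask sel tour.dropLast)) := by
  unfold get_subtours_in_region_alt pvSlices pvStarts pvEnds pvMask
  rw [PySem.List.slice_to_neg_one]
  simp only [List.length_map]
  apply List.map_congr_left
  intro p _
  rw [show ((p.2 : Int) + 1) = (((p.2 + 1 : Nat)) : Int) by push_cast; ring,
    PySem.List.slice_natCast]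

-- ===== VERDICT (by name: the statement is the Claim_ definition above) =====
theorem get_subtours_in_region_spec : Claim_equal_get_subtours_in_region := by
  intro tour sel _
  unfold Spec_get_subtours_in_region get_subtours_in_region
  rw [pvAltEq, pvBMain]
  rw [show ((0 : Int)) = ((0 : Nat) : Int) by norm_num,
    pvBridge tour sel (tour.length - 1) 0 ([], []) (by omega)]
  have h := pvMain sel (tour.getLastD 0) tour.dropLast [] []
    (by intro c t _ h; exact absurd rfl h)
  simp only [pvFlush] at h
  exact h.trans (by simp [pvMerge])
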